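-- pv_equiv track=rewrite | github.com/MaxKolosovskiy/Algo | src/laba2_painters_alg.py | main_paint_time
-- ===== SOURCE A (Python) =====
-- def main_paint_time(K, T, L):
--
--   painters = [0] * K
--
--   if K < len(L):
--     board_for_one_painter = len(L) // K
--     remaining = len(L) % K
--     start = 0
--     for item in range(K):
--       end = start + board_for_one_painter
--       if remaining > 0:
--         end += 1
--         remaining -= 1
--
--       painters[item] = sum(L[start:end]) * T
--       start = end
--   else:
--     for i in range(len(L)):
--        painters[i] = L[i] * T
--
--   result = max(painters)
--
--   return result
-- ===== SOURCE B (Python) =====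
-- def main_paint_time(K, T, L):
--     # prefix sums: P[j] = sum of first j elements
--     P = [0]
--     for x in L:
--         P.append(P[-1] + x)
--     base, extra = divmod(len(L), K)
--     # painter i covers L[start(i):start(i+1)]
--     def start(i):
--         return i * base + min(i, extra)
--     return max((P[start(i + 1)] - P[start(i)]) * T for i in range(K))
-- ===== Notes on version B (the rewrite author's own statement) =====
-- stated objective: simpler
-- what changed: B replaces A's two-branch loop (slice-and-sum per painter in one branch, per-element copy in the other) with a single unified path: a prefix-sum array plus a closed-form chunk-boundary formula start(i)=i*base+min(i,extra), taking the max of K prefix differences.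
import Mathlib
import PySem

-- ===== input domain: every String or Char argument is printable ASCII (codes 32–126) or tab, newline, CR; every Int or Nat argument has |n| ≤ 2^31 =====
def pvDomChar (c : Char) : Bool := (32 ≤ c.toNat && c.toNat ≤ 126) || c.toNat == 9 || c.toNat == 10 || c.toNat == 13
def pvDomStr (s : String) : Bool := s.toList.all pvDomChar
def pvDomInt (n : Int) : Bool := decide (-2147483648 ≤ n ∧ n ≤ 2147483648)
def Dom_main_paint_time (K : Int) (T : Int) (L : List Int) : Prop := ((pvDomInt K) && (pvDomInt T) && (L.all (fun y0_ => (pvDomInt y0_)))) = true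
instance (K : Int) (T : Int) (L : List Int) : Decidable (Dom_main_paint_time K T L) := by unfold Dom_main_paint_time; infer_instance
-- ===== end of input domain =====

-- B replaces A's two-branch loop with one unified path: a prefix-sum array and a
-- closed-form chunk boundary start(i) = i*base + min(i, extra); objective: simpler.

-- ===== PORT A =====
def main_paint_time (K : Int) (T : Int) (L : List Int) : Int :=
  let painters : List Int := List.replicate K.toNat 0      -- [0] * K
  let painters : List Int :=
    if K < (L.length : Int) then
      -- board_for_one_painter = len(L) // K ; remaining = len(L) % K ; start = 0
      let b := PySem.Int.floordiv (L.length : Int) K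
      let st := (PySem.List.pyRange 0 K 1).foldl
        (fun (st : List Int × Int × Int) item =>
          let painters := st.1
          let start := st.2.1
          let remaining := st.2.2
          let e := start + b
          let e := if remaining > 0 then e + 1 else e
          let remaining := if remaining > 0 then remaining - 1 else remaining
          -- painters[item] = sum(L[start:end]) * T ; start = end
          (PySem.List.pySetD painters item
            ((PySem.List.slice L (some start) (some e)).sum * T), e, remaining))
        (painters, 0, PySem.Int.mod (L.length : Int) K)
      st.1
    else
      (PySem.List.pyRange 0 (L.length : Int) 1).foldl
        (fun painters i => PySem.List.pySetD painters i (PySem.List.pyGetD L i 0 * T))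
        painters
  -- result = max(painters); Pre_ gives K ≥ 1, so painters ≠ [] and max? is some
  (PySem.List.max? painters (fun x => x)).getD 0

-- ===== PORT B =====
def main_paint_time_alt (K : Int) (T : Int) (L : List Int) : Int :=
  -- P = [0]; for x in L: P.append(P[-1] + x)
  let P : List Int := L.foldl (fun acc x => acc ++ [PySem.List.pyGetD acc (-1) 0 + x]) [0]
  let base := PySem.Int.floordiv (L.length : Int) K
  let extra := PySem.Int.mod (L.length : Int) K
  let start := fun (i : Int) => i * base + min i extra
  let vals := (PySem.List.pyRange 0 K 1).map
    (fun i => (PySem.List.pyGetD P (start (i + 1)) 0 - PySem.List.pyGetD P (start i) 0) * T)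
  -- max(...); Pre_ gives K ≥ 1, so vals ≠ [] and max? is some
  (PySem.List.max? vals (fun x => x)).getD 0

-- ===== PRECONDITION & SPEC =====
-- Pre_ excludes exactly K ≤ 0, where Python A raises (ZeroDivisionError on len(L)//0,
-- or ValueError from max([]) since painters is empty); B raises there too.
def Pre_main_paint_time (K : Int) (T : Int) (L : List Int) : Prop := 1 ≤ K
instance (K : Int) (T : Int) (L : List Int) : Decidable (Pre_main_paint_time K T L) := by
  unfold Pre_main_paint_time; infer_instance

def pvWitness_main_paint_time : Int × Int × List Int := (2, 3, [1, 2, 3])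

def Spec_main_paint_time (K : Int) (T : Int) (L : List Int) (out : Int) : Prop :=
  out = main_paint_time_alt K T L
instance (K : Int) (T : Int) (L : List Int) (out : Int) : Decidable (Spec_main_paint_time K T L out) := by
  unfold Spec_main_paint_time; infer_instance

-- ===== CLAIM (what is proved, stated in full; the proofs are below) =====
def Claim_equal_main_paint_time : Prop :=
  ∀ (K : Int) (T : Int) (L : List Int), Dom_main_paint_time K T L →
    Pre_main_paint_time K T L → Spec_main_paint_time K T L (main_paint_time K T L)

-- ===== LEMMAS AND PROOFS =====

-- sum of the first j elements (j an Int index into the prefix-sum array)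
def pvTake (L : List Int) (j : Int) : Int := (L.take j.toNat).sum
-- boundary of painter i's chunk
def pvS (b r i : Int) : Int := i * b + min i r
-- painter i's value
def pvVal (L : List Int) (T b r i : Int) : Int :=
  (pvTake L (pvS b r (i + 1)) - pvTake L (pvS b r i)) * T

-- sum over a slice = difference of prefix sums
theorem pv_sum_drop_take (L : List Int) (a c : Nat) (h : a ≤ c) :
    ((L.drop a).take (c - a)).sum = (L.take c).sum - (L.take a).sum := by
  have e1 : (L.take c).take a = L.take a := by rw [List.take_take]; congr 1; omega
  have e2 : (L.take c).drop a = (L.drop a).take (c - a) := by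
    rw [List.drop_take]
  have e3 : (L.take c).sum = (L.take a).sum + ((L.drop a).take (c - a)).sum := by
    conv_lhs => rw [← List.take_append_drop a (L.take c)]
    rw [List.sum_append, e1, e2]
  omega

-- the prefix-sum build loop, characterised
theorem pv_P_eq (L : List Int) :
    L.foldl (fun acc x => acc ++ [PySem.List.pyGetD acc (-1) 0 + x]) [0]
      = (List.range (L.length + 1)).map (fun j => (L.take j).sum) := by
  induction L using List.reverseRecOn with
  | nil => simp
  | append_singleton L x ih =>
    rw [List.foldl_append, ih]
    simp only [List.foldl_cons, List.foldl_nil]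
    have hlast : PySem.List.pyGetD
        ((List.range (L.length + 1)).map (fun j => (L.take j).sum)) (-1) 0 = L.sum := by
      rw [List.range_succ, List.map_append]
      simp [PySem.List.pyGetD_neg_one_append_singleton]
    rw [hlast]
    have hlen : (L ++ [x]).length + 1 = (L.length + 1) + 1 := by simp
    rw [hlen, List.range_succ (n := L.length + 1), List.map_append]
    congr 1
    · refine List.map_congr_left (fun a ha => ?_)
      have ha' : a ≤ L.length := by
        have := List.mem_range.mp ha; omega
      rw [List.take_append_of_le_length ha']
    · simp [List.take_of_length_le (by simp : (L ++ [x]).length ≤ L.length + 1)]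

-- generic write-loop lemma used for both of A's branches:
-- writing f i at position i for i = j..m-1 into a list of length kn (m ≤ kn)
theorem pv_write_loop (f : Int → Int) (m : Int) (kn : Nat) :
    ∀ (j : Int) (painters : List Int), 0 ≤ j → j ≤ m → m ≤ (kn : Int) →
      painters.length = kn →
      (PySem.List.pyRange j m 1).foldl
          (fun painters i => PySem.List.pySetD painters i (f i)) painters
        = (List.range kn).map (fun (q : Nat) =>
            if j ≤ (q : Int) ∧ (q : Int) < m then f (q : Int) else painters.getD q 0) := by
  have main : ∀ (d : Nat) (j : Int) (painters : List Int), (m - j).toNat = d → 0 ≤ j →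
      j ≤ m → m ≤ (kn : Int) → painters.length = kn →
      (PySem.List.pyRange j m 1).foldl
          (fun painters i => PySem.List.pySetD painters i (f i)) painters
        = (List.range kn).map (fun (q : Nat) =>
            if j ≤ (q : Int) ∧ (q : Int) < m then f (q : Int) else painters.getD q 0) := by
    intro d
    induction d with
    | zero =>
      intro j painters hd h0 hjm hmkn hlen
      have hj : m ≤ j := by omega
      rw [PySem.List.pyRange_one_eq_nil hj, List.foldl_nil]
      refine (List.ext_getElem (by simp [hlen]) ?_).symm
      intro q h1 h2
      have hq : q < kn := by simpa using h1
      have hfalse : ¬ (j ≤ (q : Int) ∧ (q : Int) < m) := by omega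
      simp [hfalse, List.getD_eq_getElem?_getD, List.getElem?_eq_getElem (by omega : q < painters.length)]
    | succ d ih =>
      intro j painters hd h0 hjm hmkn hlen
      have hj : j < m := by omega
      rw [PySem.List.pyRange_one_cons hj, List.foldl_cons]
      have hlen' : (PySem.List.pySetD painters j (f j)).length = kn := by
        rw [PySem.List.length_pySetD, hlen]
      rw [ih (j + 1) _ (by omega) (by omega) (by omega) hmkn hlen']
      refine List.map_congr_left (fun q hq => ?_)
      have hqkn : q < kn := List.mem_range.mp hq
      have hset : PySem.List.pySetD painters j (f j) = painters.set j.toNat (f j) :=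
        PySem.List.pySetD_of_nonneg painters (f j) h0
      by_cases hcase : (q : Int) = j
      · have hqt : q = j.toNat := by omega
        have hlt : j.toNat < painters.length := by omega
        have : (painters.set j.toNat (f j)).getD q 0 = f j := by
          rw [hqt, List.getD_eq_getElem?_getD, List.getElem?_set_self (by omega)]
          simp
        rw [hset]
        rw [if_neg (by omega), this, if_pos (by omega), hcase]
      · have : (painters.set j.toNat (f j)).getD q 0 = painters.getD q 0 := by
          rw [List.getD_eq_getElem?_getD, List.getElem?_set_ne (by omega), ← List.getD_eq_getElem?_getD]
        rw [hset]
        by_cases hc2 : j ≤ (q : Int) ∧ (q : Int) < m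
        · rw [if_pos (by omega), if_pos hc2]
        · rw [if_neg (by omega), if_neg hc2, this]
  intro j painters h0 hjm hmkn hlen
  exact main (m - j).toNat j painters rfl h0 hjm hmkn hlen

-- A's first-branch loop, characterised
theorem pv_loopA (L : List Int) (K T b r : Int) (hb : b = PySem.Int.floordiv (L.length : Int) K)
    (hr : r = PySem.Int.mod (L.length : Int) K) (hK : 1 ≤ K) (hKn : K < (L.length : Int)) :
    ∀ (j : Int) (painters : List Int), 0 ≤ j → j ≤ K → painters.length = K.toNat →
      ((PySem.List.pyRange j K 1).foldl
          (fun (st : List Int × Int × Int) item =>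
            let painters := st.1
            let start := st.2.1
            let remaining := st.2.2
            let e := start + b
            let e := if remaining > 0 then e + 1 else e
            let remaining := if remaining > 0 then remaining - 1 else remaining
            (PySem.List.pySetD painters item
              ((PySem.List.slice L (some start) (some e)).sum * T), e, remaining))
          (painters, pvS b r j, r - min j r)).1
        = (List.range K.toNat).map (fun (q : Nat) =>
            if j ≤ (q : Int) then pvVal L T b r (q : Int) else painters.getD q 0) := by
  have hn0 : (0 : Int) ≤ (L.length : Int) := by positivity
  have hbr : b * K + r = (L.length : Int) := by
    rw [hb, hr]; exact PySem.Int.floordiv_mul_add_mod _ _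
  have hr0 : 0 ≤ r := hr ▸ PySem.Int.mod_nonneg _ (by omega)
  have hrK : r < K := hr ▸ PySem.Int.mod_lt _ (by omega)
  have hb0 : 0 ≤ b := by
    rw [hb, PySem.Int.floordiv_eq_ediv_of_pos (by omega)]
    exact Int.ediv_nonneg hn0 (by omega)
  have hstep : ∀ jj : Int, pvS b r (jj + 1) = pvS b r jj + b + (if jj < r then 1 else 0) := by
    intro jj; unfold pvS
    have h1 : (jj + 1) * b = jj * b + b := by ring
    rw [h1]
    obtain ⟨t, ht⟩ : ∃ t, jj * b = t := ⟨_, rfl⟩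
    rw [ht]; split_ifs with h <;> omega
  have hSnn : ∀ jj : Int, 0 ≤ jj → 0 ≤ pvS b r jj := by
    intro jj hjj; unfold pvS
    have := mul_nonneg hjj hb0
    omega
  have hval : ∀ jj : Int, 0 ≤ jj →
      (PySem.List.slice L (some (pvS b r jj)) (some (pvS b r (jj + 1)))).sum * T
        = pvVal L T b r jj := by
    intro jj hjj
    have ha0 := hSnn jj hjj
    have hd := hstep jj
    have hc0 : 0 ≤ pvS b r (jj + 1) := hSnn (jj + 1) (by omega)
    have hle : pvS b r jj ≤ pvS b r (jj + 1) := by rw [hd]; split_ifs at * <;> omega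
    rw [PySem.List.slice_toNat L ha0 hc0,
        pv_sum_drop_take L (pvS b r jj).toNat (pvS b r (jj + 1)).toNat (by omega)]
    unfold pvVal pvTake
    ring
  have main : ∀ (d : Nat) (j : Int) (painters : List Int), (K - j).toNat = d → 0 ≤ j →
      j ≤ K → painters.length = K.toNat →
      ((PySem.List.pyRange j K 1).foldl
          (fun (st : List Int × Int × Int) item =>
            let painters := st.1
            let start := st.2.1
            let remaining := st.2.2
            let e := start + b
            let e := if remaining > 0 then e + 1 else e
            let remaining := if remaining > 0 then remaining - 1 else remaining
            (PySem.List.pySetD painters item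
              ((PySem.List.slice L (some start) (some e)).sum * T), e, remaining))
          (painters, pvS b r j, r - min j r)).1
        = (List.range K.toNat).map (fun (q : Nat) =>
            if j ≤ (q : Int) then pvVal L T b r (q : Int) else painters.getD q 0) := by
    intro d
    induction d with
    | zero =>
      intro j painters hd h0 hjm hlen
      have hj : K ≤ j := by omega
      rw [PySem.List.pyRange_one_eq_nil hj, List.foldl_nil]
      refine (List.ext_getElem (by simp [hlen]) ?_).symm
      intro q h1 h2
      have hq : q < K.toNat := by simpa using h1
      have hfalse : ¬ (j ≤ (q : Int)) := by omega
      simp [hfalse, List.getD_eq_getElem?_getD, List.getElem?_eq_getElem (by omega : q < painters.length)]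
    | succ d ih =>
      intro j painters hd h0 hjm hlen
      have hj : j < K := by omega
      rw [PySem.List.pyRange_one_cons hj, List.foldl_cons]
      simp only []
      have hrem : (r - min j r > 0) ↔ j < r := by omega
      by_cases hjr : j < r
      · rw [if_pos (hrem.mpr hjr), if_pos (hrem.mpr hjr)]
        have h1 : pvS b r j + b + 1 = pvS b r (j + 1) := by
          rw [hstep j, if_pos hjr]
        have h2 : r - min j r - 1 = r - min (j + 1) r := by omega
        rw [h1, h2, hval j h0]
        rw [ih (j + 1) _ (by omega) (by omega) (by omega)
              (by rw [PySem.List.length_pySetD, hlen])]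
        refine List.map_congr_left (fun q hq => ?_)
        have hqkn : q < K.toNat := List.mem_range.mp hq
        rw [PySem.List.pySetD_of_nonneg painters (pvVal L T b r j) h0]
        by_cases hcase : (q : Int) = j
        · have hqt : q = j.toNat := by omega
          have : (painters.set j.toNat (pvVal L T b r j)).getD q 0 = pvVal L T b r j := by
            rw [hqt, List.getD_eq_getElem?_getD, List.getElem?_set_self (by omega)]
            simp
          rw [if_neg (by omega), this, if_pos (by omega), hcase]
        · have : (painters.set j.toNat (pvVal L T b r j)).getD q 0 = painters.getD q 0 := by
            rw [List.getD_eq_getElem?_getD, List.getElem?_set_ne (by omega),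
                ← List.getD_eq_getElem?_getD]
          by_cases hc2 : j ≤ (q : Int)
          · rw [if_pos (by omega), if_pos hc2]
          · rw [if_neg (by omega), if_neg hc2, this]
      · rw [if_neg (fun h => hjr (hrem.mp h)), if_neg (fun h => hjr (hrem.mp h))]
        have h1 : pvS b r j + b = pvS b r (j + 1) := by
          rw [hstep j, if_neg hjr]; ring
        have h2 : r - min j r = r - min (j + 1) r := by omega
        rw [h1, h2, hval j h0]
        rw [ih (j + 1) _ (by omega) (by omega) (by omega)
              (by rw [PySem.List.length_pySetD, hlen])]
        refine List.map_congr_left (fun q hq => ?_)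
        have hqkn : q < K.toNat := List.mem_range.mp hq
        rw [PySem.List.pySetD_of_nonneg painters (pvVal L T b r j) h0]
        by_cases hcase : (q : Int) = j
        · have hqt : q = j.toNat := by omega
          have : (painters.set j.toNat (pvVal L T b r j)).getD q 0 = pvVal L T b r j := by
            rw [hqt, List.getD_eq_getElem?_getD, List.getElem?_set_self (by omega)]
            simp
          rw [if_neg (by omega), this, if_pos (by omega), hcase]
        · have : (painters.set j.toNat (pvVal L T b r j)).getD q 0 = painters.getD q 0 := by
            rw [List.getD_eq_getElem?_getD, List.getElem?_set_ne (by omega),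
                ← List.getD_eq_getElem?_getD]
          by_cases hc2 : j ≤ (q : Int)
          · rw [if_pos (by omega), if_pos hc2]
          · rw [if_neg (by omega), if_neg hc2, this]
  intro j painters h0 hjm hlen
  exact main (K - j).toNat j painters rfl h0 hjm hlen

-- the two ports agree for every K ≥ 1
theorem pv_main_core (K T : Int) (L : List Int) (hK : 1 ≤ K) :
    main_paint_time K T L = main_paint_time_alt K T L := by
  have hn0 : (0 : Int) ≤ (L.length : Int) := by positivity
  set b := PySem.Int.floordiv (L.length : Int) K with hb
  set r := PySem.Int.mod (L.length : Int) K with hr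
  have hbr : b * K + r = (L.length : Int) := PySem.Int.floordiv_mul_add_mod _ _
  have hr0 : 0 ≤ r := PySem.Int.mod_nonneg _ (by omega)
  have hrK : r < K := PySem.Int.mod_lt _ (by omega)
  have hb0 : 0 ≤ b := by
    rw [hb, PySem.Int.floordiv_eq_ediv_of_pos (by omega)]
    exact Int.ediv_nonneg hn0 (by omega)
  have hSnn : ∀ i : Int, 0 ≤ i → 0 ≤ pvS b r i := by
    intro i hi; unfold pvS
    have := mul_nonneg hi hb0
    omega
  have hSle : ∀ i : Int, 0 ≤ i → i ≤ K → pvS b r i ≤ (L.length : Int) := by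
    intro i h0 hiK; unfold pvS
    have h1 : i * b ≤ b * K := by rw [mul_comm]; exact mul_le_mul_of_nonneg_left hiK hb0
    have h2 : min i r ≤ r := min_le_right _ _
    linarith
  have hP := pv_P_eq L
  have hPlen : (L.foldl (fun acc x => acc ++ [PySem.List.pyGetD acc (-1) 0 + x]) [0]).length
      = L.length + 1 := by rw [hP]; simp
  have hPg : ∀ i : Int, 0 ≤ i → i ≤ (L.length : Int) →
      PySem.List.pyGetD (L.foldl (fun acc x => acc ++ [PySem.List.pyGetD acc (-1) 0 + x]) [0]) i 0
        = pvTake L i := by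
    intro i h0 hle
    have hlt : i < ((L.foldl (fun acc x => acc ++ [PySem.List.pyGetD acc (-1) 0 + x]) [0]).length : Int) := by
      rw [hPlen]; omega
    rw [PySem.List.pyGetD_eq_getElem _ 0 h0 hlt]
    simp only [hP, List.getElem_map, List.getElem_range, pvTake]
  have htake1 : ∀ q : Nat, q < L.length → (L.take (q + 1)).sum - (L.take q).sum = L.getD q 0 := by
    intro q hq
    rw [List.take_succ, List.sum_append, List.getElem?_eq_getElem hq,
        List.getD_eq_getElem?_getD, List.getElem?_eq_getElem hq]
    simp
  -- B's result, expressed through pvVal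
  have hAlt : main_paint_time_alt K T L
      = (PySem.List.max? ((List.range K.toNat).map (fun (q : Nat) => pvVal L T b r (q : Int)))
          (fun x => x)).getD 0 := by
    simp only [main_paint_time_alt, ← hb, ← hr]
    refine congrArg (fun l => (PySem.List.max? l (fun x => x)).getD 0) ?_
    rw [PySem.List.pyRange_one 0 K, List.map_map]
    have hK0 : (K - 0).toNat = K.toNat := by omega
    rw [hK0]
    refine List.map_congr_left (fun q hq => ?_)
    have hqK : q < K.toNat := List.mem_range.mp hq
    simp only [Function.comp, zero_add]
    rw [hPg ((q : Int) * b + min (q : Int) r) (hSnn _ (by positivity)) (hSle _ (by positivity) (by omega)),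
        hPg (((q : Int) + 1) * b + min ((q : Int) + 1) r) (hSnn _ (by positivity)) (hSle _ (by positivity) (by omega))]
    rfl
  -- A's result, expressed through pvVal
  have hA : main_paint_time K T L
      = (PySem.List.max? ((List.range K.toNat).map (fun (q : Nat) => pvVal L T b r (q : Int)))
          (fun x => x)).getD 0 := by
    simp only [main_paint_time, ← hb, ← hr]
    refine congrArg (fun l => (PySem.List.max? l (fun x => x)).getD 0) ?_
    by_cases hcase : K < (L.length : Int)
    · rw [if_pos hcase]
      have h00 : pvS b r 0 = 0 := by unfold pvS; simp [zero_mul]; omega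
      have h01 : r - min 0 r = r := by omega
      have hloop := pv_loopA L K T b r hb hr hK hcase 0 (List.replicate K.toNat 0)
        le_rfl (by omega) (by simp)
      rw [h00, h01] at hloop
      rw [hloop]
      refine List.map_congr_left (fun q hq => ?_)
      rw [if_pos (by positivity)]
    · rw [if_neg hcase]
      have hwl := pv_write_loop (fun i => PySem.List.pyGetD L i 0 * T) (L.length : Int) K.toNat
        0 (List.replicate K.toNat 0) le_rfl (by omega) (by omega) (by simp)
      rw [hwl]
      -- in this regime pvS i = min i len
      have hb1 : b ≤ 1 := by
        have h1 : b * K ≤ 1 * K := by linarith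
        exact le_of_mul_le_mul_right h1 (by omega)
      have hSform : ∀ i : Int, 0 ≤ i → i ≤ K → pvS b r i = min i (L.length : Int) := by
        intro i h0 hiK
        rcases (by omega : b = 0 ∨ b = 1) with h | h
        · have hbr' : r = (L.length : Int) := by rw [h, zero_mul] at hbr; omega
          unfold pvS; rw [h]; simp only [mul_zero]; omega
        · have hbr' : K + r = (L.length : Int) := by rw [h, one_mul] at hbr; exact hbr
          unfold pvS; rw [h]; simp only [mul_one]; omega
      refine List.map_congr_left (fun q hq => ?_)
      have hqK : q < K.toNat := List.mem_range.mp hq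
      by_cases hq2 : (q : Int) < (L.length : Int)
      · rw [if_pos ⟨by positivity, hq2⟩]
        unfold pvVal
        rw [hSform ((q : Int) + 1) (by positivity) (by omega),
            hSform (q : Int) (by positivity) (by omega)]
        have e1 : min ((q : Int) + 1) (L.length : Int) = (q : Int) + 1 := by omega
        have e2 : min (q : Int) (L.length : Int) = (q : Int) := by omega
        rw [e1, e2]
        unfold pvTake
        have e3 : ((q : Int) + 1).toNat = q + 1 := by omega
        have e4 : ((q : Int)).toNat = q := by omega
        rw [e3, e4, htake1 q (by omega)]
        simp
      · rw [if_neg (by omega)]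
        unfold pvVal
        rw [hSform ((q : Int) + 1) (by positivity) (by omega),
            hSform (q : Int) (by positivity) (by omega)]
        have e1 : min ((q : Int) + 1) (L.length : Int) = (L.length : Int) := by omega
        have e2 : min (q : Int) (L.length : Int) = (L.length : Int) := by omega
        rw [e1, e2, sub_self, zero_mul]
        simp [List.getD_eq_getElem?_getD, hqK]
  rw [hA, hAlt]

theorem main_paint_time_spec : Claim_equal_main_paint_time := by
  intro K T L _ hK
  exact pv_main_core K T L hK
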